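-- pv_equiv track=rewrite | github.com/HugeCoderGuy/AlpenFlowDinApp | Python code/smath/lists.py | mix_list
-- ===== SOURCE A (Python) =====
-- def mix_list(list_to_mix, mixing_index):
--     '''
--     A function that mixes lists. It is best described by an example:
--
--         Example:
--         list_to_mix = [0,1,2,3,4,5,6,7,8,9,10,11,12,13,14]
--         mixing_index = 4
--
--         The function first slices list_to_mix into 'mixing_index' number of
--         semi-equal length lists. In this case, we divide list_to_mix into 4
--         lists: three of legnth 4, one of lenght 3:
--
--         sliced_lists: (number of sliced lists = mixing_index)
--             [ 0,  1,  2,  3]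
--             [ 4,  5,  6,  7]
--             [ 8,  9, 10, 11]
--             [12, 13, 14]
--
--         The sliced lists are then combined in alternating order: first element
--         of the first list, first element of the second list, and so on. The
--         final output is:
--
--             Output: [0, 4, 8, 12, 1, 5, 9, 13, 2, 6, 10, 14, 3, 7, 11]
--
--     Parameters
--     ----------
--     list_to_mix : list
--         The list that you want to mix up.
--     mixing_index : int
--         An integer describing how much to mix the list. The function will break
--         up list_to_mix into 'mixing_index' number of semi-equal chunks, and
--         then add them together.
--
--         Limits: 0 < mixing_index < ????? (definitely can't be longer than the
--                                           list length, but I don't know exactly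
--                                           know what the upper bound should be)
--
--     Returns
--     -------
--     mixed_list : list
--         The mixed list.
--
--     '''
--
--     if mixing_index <=0:
--         raise Exception('ERROR: mixing_index out of range. Choose a value on the interval 0 < mixing_index < ??')
--     if type(mixing_index) != int:
--         raise Exception('ERROR: mixing_index must be an integer. Choose a value on the interval 0 < mixing_index < ??')
--
--     # Create list of lengths
--     list_length = len(list_to_mix)
--     lengths = []
--     remainder = list_length%mixing_index
--     divide = int(list_length/mixing_index)
--
--     for i in range(mixing_index):
--         if remainder != 0:
--             lengths.append(divide+1)
--             remainder = remainder - 1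
--         else:
--             lengths.append(divide)
--
--     # Slice list_to_mix using list_length values
--     sliced_lists = []
--     start = 0
--     stop = 0
--     step = 1
--     for value in lengths:
--         start = stop
--         stop = stop + value
--         sliced_lists.append(list_to_mix[start:stop:step])
--
--     # Mix sliced_lists together to create mix_list
--     mixed_list = []
--     for j in range(len(sliced_lists[0])):
--         for i in range(len(sliced_lists)):
--             try:
--                 mixed_list.append(sliced_lists[i][j])
--             except:
--                 # Index out of range
--                 pass
--
--     return mixed_list
-- ===== SOURCE B (Python) =====
-- def mix_list(list_to_mix, mixing_index):
--     '''Closed-form re-implementation: instead of materialising the chunk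
--     lists and interleaving them with a nested index loop guarded by
--     try/except, compute each output element's source index directly.
--     Chunk i starts at i*d + min(i, r) (d, r = divmod(len, mixing_index));
--     rows 0..d-1 take one element from every chunk, and the extra row d
--     takes one element from each of the first r (longer) chunks.'''
--     if mixing_index <= 0:
--         raise Exception('ERROR: mixing_index out of range. Choose a value on the interval 0 < mixing_index < ??')
--     if type(mixing_index) != int:
--         raise Exception('ERROR: mixing_index must be an integer. Choose a value on the interval 0 < mixing_index < ??')
--     d, r = divmod(len(list_to_mix), mixing_index)
--     body = [list_to_mix[i * d + min(i, r) + j]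
--             for j in range(d) for i in range(mixing_index)]
--     tail = [list_to_mix[i * (d + 1) + d] for i in range(r)]
--     return body + tail
-- ===== Notes on version B (the rewrite author's own statement) =====
-- stated objective: simpler
-- what changed: B never builds the chunk lists: it computes each output element's source index in closed form (chunk i starts at i*d+min(i,r)), emitting d full interleaved rows plus one partial row of the r longer chunks, replacing A's lengths/slices construction and the nested index loop with try/except.
import Mathlib
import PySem

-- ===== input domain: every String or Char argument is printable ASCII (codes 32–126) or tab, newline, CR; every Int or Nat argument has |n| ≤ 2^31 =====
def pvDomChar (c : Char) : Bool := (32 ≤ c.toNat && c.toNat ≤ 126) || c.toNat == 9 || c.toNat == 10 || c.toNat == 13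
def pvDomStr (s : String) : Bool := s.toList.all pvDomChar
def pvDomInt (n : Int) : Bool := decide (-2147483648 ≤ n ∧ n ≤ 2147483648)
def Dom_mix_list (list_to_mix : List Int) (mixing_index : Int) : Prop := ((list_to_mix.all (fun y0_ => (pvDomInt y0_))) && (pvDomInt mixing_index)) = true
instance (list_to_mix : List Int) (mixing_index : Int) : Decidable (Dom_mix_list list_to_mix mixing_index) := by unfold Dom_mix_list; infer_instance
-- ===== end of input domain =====

-- B replaces A's chunk construction + nested index loop with closed-form source indices (return value only; no mutation involved).

-- ===== PORT A =====
-- transliteration of Source A's mix_list; on mixing_index ≤ 0 Python raises (excluded by Pre_), we return [].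
-- int(list_length/mixing_index) equals floor division here (both operands nonnegative, exact in float).
def mix_list (list_to_mix : List Int) (mixing_index : Int) : List Int :=
  if mixing_index ≤ 0 then []            -- Python: raise Exception(...)
  else
    let list_length : Int := list_to_mix.length
    let remainder := PySem.Int.mod list_length mixing_index
    let divide := PySem.Int.floordiv list_length mixing_index
    -- for i in range(mixing_index): build lengths, decrementing remainder
    let st1 := (PySem.List.pyRange 0 mixing_index 1).foldl
      (fun (st : List Int × Int) _ =>
        if st.2 ≠ 0 then (st.1 ++ [divide + 1], st.2 - 1)
        else (st.1 ++ [divide], st.2)) ([], remainder)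
    let lengths := st1.1
    -- for value in lengths: slice list_to_mix[start:stop:1] (step is the constant 1, so xs[a:b:1] = xs[a:b])
    let st2 := lengths.foldl
      (fun (st : List (List Int) × Int × Int) value =>
        let start := st.2.2
        let stop := st.2.2 + value
        (st.1 ++ [PySem.List.slice list_to_mix (some start) (some stop)], start, stop))
      ([], 0, 0)
    let sliced_lists := st2.1
    -- for j in range(len(sliced_lists[0])): for i in range(len(sliced_lists)): try append sliced_lists[i][j] except pass
    (PySem.List.pyRange 0 (((PySem.List.pyGet? sliced_lists 0).getD []).length) 1).foldl
      (fun mixed j =>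
        (PySem.List.pyRange 0 (sliced_lists.length) 1).foldl
          (fun mixed2 i =>
            match (PySem.List.pyGet? sliced_lists i).bind
                    (fun row => PySem.List.pyGet? row j) with
            | some x => mixed2 ++ [x]
            | none => mixed2) mixed) []

-- ===== PORT B =====
-- transliteration of Source B; the comprehension indices are always in range (Python never hits IndexError),
-- so pyGet? always returns some and filterMap drops nothing.
def mix_list_alt (list_to_mix : List Int) (mixing_index : Int) : List Int :=
  if mixing_index ≤ 0 then []            -- Python: raise Exception(...)
  else
    let d := PySem.Int.floordiv (list_to_mix.length : Int) mixing_index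
    let r := PySem.Int.mod (list_to_mix.length : Int) mixing_index
    let body := (PySem.List.pyRange 0 d 1).flatMap (fun j =>
      (PySem.List.pyRange 0 mixing_index 1).filterMap (fun i =>
        PySem.List.pyGet? list_to_mix (i * d + min i r + j)))
    let tail := (PySem.List.pyRange 0 r 1).filterMap (fun i =>
      PySem.List.pyGet? list_to_mix (i * (d + 1) + d))
    body ++ tail

-- ===== PRECONDITION & SPEC =====
-- Pre_ excludes exactly mixing_index ≤ 0, where the Python A raises an Exception.
def Pre_mix_list (list_to_mix : List Int) (mixing_index : Int) : Prop := 1 ≤ mixing_index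
instance (list_to_mix : List Int) (mixing_index : Int) : Decidable (Pre_mix_list list_to_mix mixing_index) := by unfold Pre_mix_list; infer_instance
def pvWitness_mix_list : List Int × Int := ([0, 1, 2, 3, 4, 5, 6], 3)

def Spec_mix_list (list_to_mix : List Int) (mixing_index : Int) (out : List Int) : Prop := out = mix_list_alt list_to_mix mixing_index
instance (list_to_mix : List Int) (mixing_index : Int) (out : List Int) : Decidable (Spec_mix_list list_to_mix mixing_index out) := by unfold Spec_mix_list; infer_instance

-- ===== CLAIM (what is proved, stated in full; the proofs are below) =====
def Claim_equal_mix_list : Prop := ∀ (list_to_mix : List Int) (mixing_index : Int), Dom_mix_list list_to_mix mixing_index → Pre_mix_list list_to_mix mixing_index → Spec_mix_list list_to_mix mixing_index (mix_list list_to_mix mixing_index)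

-- ===== LEMMAS AND PROOFS =====

-- Nat-level description of the chunking: chunk i of l starts at i*D + min i R and has length D+1 (i < R) or D.
def pvStartN (D R i : Nat) : Nat := i * D + min i R
def pvLenN (D R i : Nat) : Nat := if i < R then D + 1 else D
def pvChunk (l : List Int) (D R i : Nat) : List Int := (l.drop (pvStartN D R i)).take (pvLenN D R i)

-- the per-chunk slicing recursion equivalent to A's second loop
def pvSlicesFrom (l : List Int) : List Int → Int → List (List Int)
  | [], _ => []
  | v :: L, s => PySem.List.slice l (some s) (some (s + v)) :: pvSlicesFrom l L (s + v)

theorem pv_lengths_foldl (dv : Int) {α : Type} (L : List α) (acc : List Int) (rem : Nat) :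
    (L.foldl (fun (st : List Int × Int) _ =>
        if st.2 ≠ 0 then (st.1 ++ [dv + 1], st.2 - 1)
        else (st.1 ++ [dv], st.2)) (acc, (rem : Int))).1
      = acc ++ List.replicate (min rem L.length) (dv + 1) ++ List.replicate (L.length - rem) dv := by
  induction L generalizing acc rem with
  | nil => simp
  | cons u L ih =>
    cases rem with
    | zero =>
      have h := ih (acc ++ [dv]) 0
      simp only [List.foldl_cons, if_neg (by simp : ¬ (((acc, ((0:Nat):Int)).2 ≠ 0)))] at *
      simp only [Nat.cast_zero] at h ⊢
      rw [h]
      simp [List.replicate_succ]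
    | succ s =>
      have h := ih (acc ++ [dv + 1]) s
      simp only [List.foldl_cons]
      rw [if_pos (by push_cast; omega : (((acc, ((s+1:Nat):Int)).2 ≠ 0)))]
      have e2 : ((s+1:Nat):Int) - 1 = ((s:Nat):Int) := by push_cast; omega
      simp only [e2] at *
      rw [show ((acc, ((s+1:Nat):Int)).1 ++ [dv+1]) = acc ++ [dv+1] from rfl]
      rw [h]
      have : min (s+1) (L.length+1) = min s L.length + 1 := by omega
      simp [this, List.replicate_succ, Nat.succ_sub_succ]

theorem pv_slices_foldl (l : List Int) (L : List Int) (acc : List (List Int)) (a s : Int) :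
    (L.foldl (fun (st : List (List Int) × Int × Int) value =>
        (st.1 ++ [PySem.List.slice l (some st.2.2) (some (st.2.2 + value))], st.2.2, st.2.2 + value))
      (acc, a, s)).1 = acc ++ pvSlicesFrom l L s := by
  induction L generalizing acc a s with
  | nil => simp [pvSlicesFrom]
  | cons v L ih =>
    simp only [List.foldl_cons, pvSlicesFrom]
    rw [ih]
    simp

theorem pv_slicesFrom_append (l : List Int) (L1 L2 : List Int) (s : Int) :
    pvSlicesFrom l (L1 ++ L2) s = pvSlicesFrom l L1 s ++ pvSlicesFrom l L2 (s + L1.sum) := by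
  induction L1 generalizing s with
  | nil => simp [pvSlicesFrom]
  | cons v L ih =>
    simp only [List.cons_append, pvSlicesFrom, ih, List.sum_cons]
    rw [show s + v + L.sum = s + (v + L.sum) from by ring]

theorem pv_slicesFrom_replicate (l : List Int) (p x : Nat) (s : Nat) :
    pvSlicesFrom l (List.replicate p (x : Int)) (s : Int)
      = (List.range p).map (fun k => (l.drop (s + k * x)).take x) := by
  induction p generalizing s with
  | zero => simp [pvSlicesFrom]
  | succ p ih =>
    rw [List.replicate_succ, List.range_succ_eq_map]
    simp only [pvSlicesFrom]
    rw [PySem.List.slice_natCast_add]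
    have e : (s : Int) + (x : Int) = ((s + x : Nat) : Int) := by push_cast; ring
    rw [e, ih (s + x)]
    simp only [List.map_cons, List.map_map]
    congr 1
    · simp
    · apply List.map_congr_left
      intro k _
      simp only [Function.comp]
      congr 2
      rw [Nat.succ_mul]; omega

theorem pv_sliced_eq (l : List Int) (M D R : Nat) (hRM : R ≤ M) :
    pvSlicesFrom l (List.replicate R ((D : Int) + 1) ++ List.replicate (M - R) (D : Int)) 0
      = (List.range M).map (pvChunk l D R) := by
  obtain ⟨K, hK⟩ : ∃ K, M = R + K := ⟨M - R, by omega⟩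
  subst hK
  simp only [Nat.add_sub_cancel_left]
  have cast1 : ((D : Int) + 1) = ((D + 1 : Nat) : Int) := by push_cast; ring
  rw [pv_slicesFrom_append, cast1]
  have sum1 : (List.replicate R (((D + 1 : Nat) : Int))).sum = ((R * (D + 1) : Nat) : Int) := by
    simp [List.sum_replicate]
  rw [sum1]
  rw [show (0 : Int) = ((0 : Nat) : Int) from rfl]
  rw [pv_slicesFrom_replicate l R (D+1) 0]
  rw [show ((0:Nat):Int) + ((R * (D + 1) : Nat) : Int) = ((R * (D + 1) : Nat) : Int) from by ring]
  rw [pv_slicesFrom_replicate l K D (R * (D+1))]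
  rw [List.range_add, List.map_append, List.map_map]
  congr 1
  · apply List.map_congr_left
    intro k hk
    rw [List.mem_range] at hk
    unfold pvChunk pvStartN pvLenN
    rw [if_pos (by omega), min_eq_left (by omega)]
    have : 0 + k * (D + 1) = k * D + k := by ring
    rw [this]
  · apply List.map_congr_left
    intro k hk
    rw [List.mem_range] at hk
    simp only [Function.comp]
    unfold pvChunk pvStartN pvLenN
    rw [if_neg (by omega), min_eq_right (by omega)]
    have : R * (D + 1) + k * D = (R + k) * D + R := by ring
    rw [this]

theorem pv_inner (sliced : List (List Int)) (j : Int) (Li : List Int) (acc : List Int) :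
    Li.foldl (fun mixed2 i =>
        match (PySem.List.pyGet? sliced i).bind (fun row => PySem.List.pyGet? row j) with
        | some x => mixed2 ++ [x]
        | none => mixed2) acc
      = acc ++ Li.filterMap (fun i => (PySem.List.pyGet? sliced i).bind (fun row => PySem.List.pyGet? row j)) := by
  induction Li generalizing acc with
  | nil => simp
  | cons a L ih =>
    simp only [List.foldl_cons, List.filterMap_cons]
    cases h : (PySem.List.pyGet? sliced a).bind (fun row => PySem.List.pyGet? row j)
    · simp [ih]
    · simp [ih]

theorem pv_double (sliced : List (List Int)) (Lj Li : List Int) (acc : List Int) :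
    Lj.foldl (fun mixed j =>
        Li.foldl (fun mixed2 i =>
          match (PySem.List.pyGet? sliced i).bind (fun row => PySem.List.pyGet? row j) with
          | some x => mixed2 ++ [x]
          | none => mixed2) mixed) acc
      = acc ++ Lj.flatMap (fun j => Li.filterMap (fun i =>
          (PySem.List.pyGet? sliced i).bind (fun row => PySem.List.pyGet? row j))) := by
  induction Lj generalizing acc with
  | nil => simp
  | cons a L ih =>
    simp only [List.foldl_cons, List.flatMap_cons]
    rw [pv_inner, ih, List.append_assoc]

theorem pv_flatMap_congr {α β : Type} {L : List α} {f g : α → List β}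
    (h : ∀ a ∈ L, f a = g a) : L.flatMap f = L.flatMap g := by
  simp only [List.flatMap_def]
  rw [List.map_congr_left h]

theorem pv_chunk_getElem? (l : List Int) (D R i j : Nat) (hj : j < pvLenN D R i) :
    (pvChunk l D R i)[j]? = l[pvStartN D R i + j]? := by
  unfold pvChunk
  rw [List.getElem?_take_of_lt hj, List.getElem?_drop]

theorem pv_chunk_getElem?_none (l : List Int) (D R i : Nat) (hi : R ≤ i) :
    (pvChunk l D R i)[D]? = none := by
  apply List.getElem?_eq_none
  have h1 : pvLenN D R i = D := by unfold pvLenN; rw [if_neg (by omega)]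
  calc (pvChunk l D R i).length ≤ pvLenN D R i := by
        unfold pvChunk; simp [List.length_take]
    _ ≤ D := by omega

theorem pv_lenN_ge (D R i : Nat) : D ≤ pvLenN D R i := by
  unfold pvLenN; split_ifs <;> omega

theorem pv_mixA (l : List Int) (m : Int) (M D R : Nat)
    (hM : (M : Int) = m) (hM1 : 1 ≤ M) (hD : D = l.length / M) (hR : R = l.length % M) :
    mix_list l m = (List.range (pvLenN D R 0)).flatMap
      (fun j => (List.range M).filterMap (fun i => (pvChunk l D R i)[j]?)) := by
  have hm : ¬ m ≤ 0 := by omega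
  have hRM : R < M := by rw [hR]; exact Nat.mod_lt _ (by omega)
  have hMD : D ≤ M * D := Nat.le_mul_of_pos_left D (by omega)
  have hN : M * D + R = l.length := by rw [hD, hR]; exact Nat.div_add_mod _ _
  simp only [mix_list, if_neg hm]
  rw [← hM]
  rw [show PySem.Int.mod (l.length : Int) (M : Int) = ((l.length % M : Nat) : Int) from PySem.Int.mod_natCast _ _]
  rw [show PySem.Int.floordiv (l.length : Int) (M : Int) = ((l.length / M : Nat) : Int) from PySem.Int.floordiv_natCast _ _]
  rw [← hR, ← hD]
  rw [pv_lengths_foldl]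
  rw [PySem.List.length_pyRange_one]
  rw [show ((M : Int) - 0).toNat = M from by omega]
  rw [min_eq_left (by omega), List.nil_append]
  rw [pv_slices_foldl, List.nil_append]
  rw [pv_sliced_eq l M D R (by omega)]
  have hget0 : (PySem.List.pyGet? ((List.range M).map (pvChunk l D R)) 0).getD []
      = pvChunk l D R 0 := by
    rw [PySem.List.pyGet?_zero]
    rw [List.getElem?_map, List.getElem?_range (by omega : 0 < M)]
    rfl
  rw [hget0]
  have hlen0 : (pvChunk l D R 0).length = pvLenN D R 0 := by
    unfold pvChunk pvStartN
    rw [List.length_take, List.length_drop]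
    have : pvLenN D R 0 ≤ l.length - (0 * D + min 0 R) := by
      unfold pvLenN; split_ifs <;> omega
    omega
  rw [hlen0]
  rw [pv_double, List.nil_append]
  rw [List.length_map, List.length_range]
  rw [PySem.List.pyRange_zero_natCast, PySem.List.pyRange_zero_natCast]
  rw [List.flatMap_map]
  apply pv_flatMap_congr
  intro j hj
  rw [List.mem_range] at hj
  rw [List.filterMap_map]
  apply List.filterMap_congr
  intro i hi
  rw [List.mem_range] at hi
  simp only [Function.comp]
  rw [PySem.List.pyGet?_natCast]
  rw [List.getElem?_map, List.getElem?_range hi]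
  simp only [Option.map_some, Option.bind_some]
  rw [PySem.List.pyGet?_natCast]

theorem pv_mixB (l : List Int) (m : Int) (M D R : Nat)
    (hM : (M : Int) = m) (hM1 : 1 ≤ M) (hD : D = l.length / M) (hR : R = l.length % M) :
    mix_list_alt l m = (List.range D).flatMap
        (fun j => (List.range M).filterMap (fun i => l[pvStartN D R i + j]?))
      ++ (List.range R).filterMap (fun k => l[pvStartN D R k + D]?) := by
  have hm : ¬ m ≤ 0 := by omega
  simp only [mix_list_alt, if_neg hm]
  rw [← hM]
  rw [show PySem.Int.mod (l.length : Int) (M : Int) = ((l.length % M : Nat) : Int) from PySem.Int.mod_natCast _ _]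
  rw [show PySem.Int.floordiv (l.length : Int) (M : Int) = ((l.length / M : Nat) : Int) from PySem.Int.floordiv_natCast _ _]
  rw [← hR, ← hD]
  rw [PySem.List.pyRange_zero_natCast, PySem.List.pyRange_zero_natCast, PySem.List.pyRange_zero_natCast]
  rw [List.flatMap_map, List.filterMap_map]
  congr 1
  · apply pv_flatMap_congr
    intro j hj
    rw [List.filterMap_map]
    apply List.filterMap_congr
    intro i hi
    rw [List.mem_range] at hi
    simp only [Function.comp]
    rw [show ((i:Int) * (D:Int) + min (i:Int) (R:Int) + (j:Int)) = ((pvStartN D R i + j : Nat) : Int) from by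
      unfold pvStartN; push_cast; ring]
    exact PySem.List.pyGet?_natCast _ _
  · apply List.filterMap_congr
    intro k hk
    rw [List.mem_range] at hk
    simp only [Function.comp]
    rw [show ((k:Int) * ((D:Int) + 1) + (D:Int)) = ((pvStartN D R k + D : Nat) : Int) from by
      unfold pvStartN; rw [min_eq_left (le_of_lt hk)]; push_cast; ring]
    exact PySem.List.pyGet?_natCast _ _

theorem pv_main (l : List Int) (M D R : Nat) (hRM : R < M) :
    (List.range (pvLenN D R 0)).flatMap
        (fun j => (List.range M).filterMap (fun i => (pvChunk l D R i)[j]?))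
      = (List.range D).flatMap
          (fun j => (List.range M).filterMap (fun i => l[pvStartN D R i + j]?))
        ++ (List.range R).filterMap (fun k => l[pvStartN D R k + D]?) := by
  have hbody : (List.range D).flatMap
        (fun j => (List.range M).filterMap (fun i => (pvChunk l D R i)[j]?))
      = (List.range D).flatMap
        (fun j => (List.range M).filterMap (fun i => l[pvStartN D R i + j]?)) := by
    apply pv_flatMap_congr
    intro j hj
    rw [List.mem_range] at hj
    apply List.filterMap_congr
    intro i _
    exact pv_chunk_getElem? l D R i j (by have := pv_lenN_ge D R i; omega)
  by_cases hR0 : R = 0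
  · subst hR0
    rw [show pvLenN D 0 0 = D from by unfold pvLenN; simp]
    simp only [List.range_zero, List.filterMap_nil, List.append_nil]
    exact hbody
  · rw [show pvLenN D R 0 = D + 1 from by unfold pvLenN; rw [if_pos (by omega)]]
    rw [List.range_succ, List.flatMap_append, hbody]
    congr 1
    rw [List.flatMap_singleton]
    rw [show M = R + (M - R) from by omega, List.range_add, List.filterMap_append, List.filterMap_map]
    have h2 : (List.range (M - R)).filterMap ((fun i => (pvChunk l D R i)[D]?) ∘ (fun x => R + x)) = [] := by
      rw [List.filterMap_eq_nil_iff]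
      intro k _
      exact pv_chunk_getElem?_none l D R (R + k) (by omega)
    rw [h2, List.append_nil]
    apply List.filterMap_congr
    intro k hk
    rw [List.mem_range] at hk
    exact pv_chunk_getElem? l D R k D (by unfold pvLenN; rw [if_pos hk]; omega)

-- ===== VERDICT (by name: the statement is the Claim_ definition above) =====
theorem mix_list_spec : Claim_equal_mix_list := by
  intro l m _ hpre
  unfold Pre_mix_list at hpre
  unfold Spec_mix_list
  have hM : ((m.toNat : Int)) = m := Int.toNat_of_nonneg (by omega)
  have hM1 : 1 ≤ m.toNat := by omega
  rw [pv_mixA l m m.toNat (l.length / m.toNat) (l.length % m.toNat) hM hM1 rfl rfl]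
  rw [pv_mixB l m m.toNat (l.length / m.toNat) (l.length % m.toNat) hM hM1 rfl rfl]
  exact pv_main l m.toNat _ _ (Nat.mod_lt _ (by omega))
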